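-- pv_equiv track=rewrite | github.com/Lucasfz25/TP-Teoria-de-algoritmos | ejercicio_1_batalla_naval.py | se_cumplen_requisitos_consumos_columnas
-- ===== SOURCE A (Python) =====
-- def se_cumplen_requisitos_consumos_columnas(tablero,n,m,restricciones_columnas):
--
--
--     cant_elementos_en_columna = 0
--
--     for c in range(0,m):
--         for f in range(0,n):
--
--             elemento = tablero[f][c]
--             if elemento != None:
--                 cant_elementos_en_columna += 1
--
--         if cant_elementos_en_columna != restricciones_columnas[c]:
--             return False
--
--         cant_elementos_en_columna = 0
--
--     return True
-- ===== SOURCE B (Python) =====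
-- def se_cumplen_requisitos_consumos_columnas(tablero, n, m, restricciones_columnas):
--     # Divide and conquer: the per-column fill-count vector of a block of rows is
--     # the componentwise sum of the vectors of its two halves; finally compare the
--     # whole vector against the requirement vector with list equality.
--     def conteos(rows):
--         if not rows:
--             return [0 for _ in range(m)]
--         if len(rows) == 1:
--             fila = rows[0]
--             return [1 if fila[c] != None else 0 for c in range(m)]
--         mid = len(rows) // 2
--         izq = conteos(rows[:mid])
--         der = conteos(rows[mid:])
--         return [izq[c] + der[c] for c in range(m)]
--     filas = [tablero[f] for f in range(n)]
--     return conteos(filas) == [restricciones_columnas[c] for c in range(m)]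
-- ===== Notes on version B (the rewrite author's own statement) =====
-- stated objective: alternative
-- what changed: Replaces A's column-major tally loop with early per-column compare by a divide-and-conquer computation of the whole column-count vector (halving the row block and merging by componentwise vector addition) followed by a single list-equality test against the requirement vector.
-- outside the precondition, e.g. on se_cumplen_requisitos_consumos_columnas([[1]], 1, 2, [0]): A returns False, B raises IndexError; on se_cumplen_requisitos_consumos_columnas([], 1, 0, []): A returns True, B raises IndexError
import Mathlib
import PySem

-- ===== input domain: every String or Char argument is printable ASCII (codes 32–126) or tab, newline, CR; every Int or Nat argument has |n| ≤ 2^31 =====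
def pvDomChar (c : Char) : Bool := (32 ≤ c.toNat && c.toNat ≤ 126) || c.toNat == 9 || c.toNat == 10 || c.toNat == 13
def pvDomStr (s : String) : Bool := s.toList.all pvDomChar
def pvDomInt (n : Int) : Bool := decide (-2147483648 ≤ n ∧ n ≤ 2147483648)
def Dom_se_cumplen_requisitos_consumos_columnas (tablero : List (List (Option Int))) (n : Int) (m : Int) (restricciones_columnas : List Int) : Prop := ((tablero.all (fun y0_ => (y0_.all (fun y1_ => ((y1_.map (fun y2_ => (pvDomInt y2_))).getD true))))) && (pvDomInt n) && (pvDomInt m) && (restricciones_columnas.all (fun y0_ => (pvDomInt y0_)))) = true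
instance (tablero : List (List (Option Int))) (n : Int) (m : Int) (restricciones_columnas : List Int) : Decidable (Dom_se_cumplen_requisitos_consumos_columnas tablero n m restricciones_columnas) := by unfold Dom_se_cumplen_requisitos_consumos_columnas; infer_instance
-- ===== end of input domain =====

-- B replaces A's column-major tally-and-compare loop by a divide-and-conquer computation
-- of the whole column-count vector (merged by componentwise addition) compared with the
-- requirement vector by a single list equality (objective: alternative, same asymptotic cost).

-- ===== PORT A =====
-- inner 'for f in range(0,n)' loop of A, for one column c
def pvA_conteo (tablero : List (List (Option Int))) (n : Int) (c : Int) : Int :=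
  (PySem.List.pyRange 0 n 1).foldl
    (fun cant f =>
      if PySem.List.pyGetD (PySem.List.pyGetD tablero f []) c none ≠ none then cant + 1 else cant)
    0

-- outer 'for c in range(0,m)' loop of A, with its early 'return False'
def pvA_columnas (tablero : List (List (Option Int))) (n : Int) (restricciones_columnas : List Int) : List Int → Bool
  | [] => true
  | c :: cs =>
    if pvA_conteo tablero n c ≠ PySem.List.pyGetD restricciones_columnas c 0 then false
    else pvA_columnas tablero n restricciones_columnas cs

def se_cumplen_requisitos_consumos_columnas (tablero : List (List (Option Int))) (n : Int) (m : Int) (restricciones_columnas : List Int) : Bool :=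
  pvA_columnas tablero n restricciones_columnas (PySem.List.pyRange 0 m 1)

-- ===== PORT B =====
-- B's recursive 'conteos(rows)': the column-count vector of a block of rows, by halving.
-- rows[:mid] / rows[mid:] with 0 ≤ mid ≤ len(rows) are exactly List.take / List.drop,
-- and len(rows)//2 on a nonnegative length is exactly Nat division.
def pvB_conteos (m : Int) (rows : List (List (Option Int))) : List Int :=
  if rows.length = 0 then
    (PySem.List.pyRange 0 m 1).map (fun _ => (0 : Int))
  else if rows.length = 1 then
    (PySem.List.pyRange 0 m 1).map (fun c =>
      if PySem.List.pyGetD (PySem.List.pyGetD rows 0 []) c none ≠ none then (1 : Int) else 0)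
  else
    let mid := rows.length / 2
    let izq := pvB_conteos m (rows.take mid)
    let der := pvB_conteos m (rows.drop mid)
    (PySem.List.pyRange 0 m 1).map (fun c =>
      PySem.List.pyGetD izq c 0 + PySem.List.pyGetD der c 0)
termination_by rows.length
decreasing_by
  · simp only [List.length_take]; omega
  · simp only [List.length_drop]; omega

def se_cumplen_requisitos_consumos_columnas_alt (tablero : List (List (Option Int))) (n : Int) (m : Int) (restricciones_columnas : List Int) : Bool :=
  let filas := (PySem.List.pyRange 0 n 1).map (fun f => PySem.List.pyGetD tablero f [])
  pvB_conteos m filas == (PySem.List.pyRange 0 m 1).map (fun c => PySem.List.pyGetD restricciones_columnas c 0)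

-- ===== PRECONDITION & SPEC =====
-- Pre_ excludes ill-shaped inputs (n exceeding the number of rows, a row shorter than m,
-- or restricciones_columnas shorter than m): there Python A may short-circuit (returning
-- False, or True when m ≤ 0) before the out-of-range access on which B's full
-- divide-and-conquer pass raises IndexError.
def Pre_se_cumplen_requisitos_consumos_columnas (tablero : List (List (Option Int))) (n : Int) (m : Int) (restricciones_columnas : List Int) : Prop :=
  n ≤ (tablero.length : Int) ∧
  (0 < m → (m ≤ (restricciones_columnas.length : Int) ∧
    ∀ fila ∈ tablero.take n.toNat, m ≤ (fila.length : Int)))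
instance (tablero : List (List (Option Int))) (n : Int) (m : Int) (restricciones_columnas : List Int) : Decidable (Pre_se_cumplen_requisitos_consumos_columnas tablero n m restricciones_columnas) := by unfold Pre_se_cumplen_requisitos_consumos_columnas; infer_instance

def pvWitness_se_cumplen_requisitos_consumos_columnas : List (List (Option Int)) × Int × Int × List Int :=
  ([[some 1, none], [none, some 2]], 2, 2, [1, 1])

def Spec_se_cumplen_requisitos_consumos_columnas (tablero : List (List (Option Int))) (n : Int) (m : Int) (restricciones_columnas : List Int) (out : Bool) : Prop := out = se_cumplen_requisitos_consumos_columnas_alt tablero n m restricciones_columnas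
instance (tablero : List (List (Option Int))) (n : Int) (m : Int) (restricciones_columnas : List Int) (out : Bool) : Decidable (Spec_se_cumplen_requisitos_consumos_columnas tablero n m restricciones_columnas out) := by unfold Spec_se_cumplen_requisitos_consumos_columnas; infer_instance

-- ===== CLAIM (what is proved, stated in full; the proofs are below) =====
def Claim_equal_se_cumplen_requisitos_consumos_columnas : Prop := ∀ (tablero : List (List (Option Int))) (n : Int) (m : Int) (restricciones_columnas : List Int), Dom_se_cumplen_requisitos_consumos_columnas tablero n m restricciones_columnas → Pre_se_cumplen_requisitos_consumos_columnas tablero n m restricciones_columnas → Spec_se_cumplen_requisitos_consumos_columnas tablero n m restricciones_columnas (se_cumplen_requisitos_consumos_columnas tablero n m restricciones_columnas)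

-- ===== LEMMAS AND PROOFS =====

-- indicator of a filled cell of a row, at a nonnegative column j
def pvInd (j : Nat) (fila : List (Option Int)) : Int :=
  if fila.getD j none ≠ none then 1 else 0

-- B's divide-and-conquer vector is the vector of per-column indicator sums
theorem pvB_conteos_eq (m : Int) (rows : List (List (Option Int))) :
    pvB_conteos m rows =
      (List.range m.toNat).map (fun j => (rows.map (pvInd j)).sum) := by
  induction rows using pvB_conteos.induct m with
  | case1 rows h0 =>
    rw [List.length_eq_zero_iff] at h0
    subst h0
    rw [pvB_conteos]
    norm_num [PySem.List.pyRange_one, List.map_map, Function.comp]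
    simp only [Function.comp_def, List.map_const', List.length_range]
  | case2 rows h0 h1 =>
    rw [List.length_eq_one_iff] at h1
    obtain ⟨fila, rfl⟩ := h1
    rw [pvB_conteos]
    norm_num [PySem.List.pyRange_one, List.map_map]
    intro j hj
    by_cases h : fila[j]?.getD none = none
    · simp [pvInd, h, List.getD_eq_getElem?_getD]
    · simp [pvInd, h, List.getD_eq_getElem?_getD]
  | case3 rows h0 h1 mid ih1 ih2 =>
    rw [pvB_conteos]
    simp only [if_neg h0, if_neg h1]
    rw [ih1, ih2, PySem.List.pyRange_one, List.map_map]
    simp only [Int.sub_zero]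
    refine List.map_congr_left ?_
    intro j hj
    rw [List.mem_range] at hj
    simp only [Function.comp]
    have hz : ((0 : Int) + (j : Int)) = ((j : Nat) : Int) := by simp
    rw [hz, PySem.List.pyGetD_natCast, PySem.List.pyGetD_natCast]
    rw [List.getD_eq_getElem _ _ (by simpa using hj), List.getD_eq_getElem _ _ (by simpa using hj)]
    simp only [List.getElem_map, List.getElem_range]
    conv_rhs => rw [← List.take_append_drop mid rows, List.map_append, List.sum_append]

-- A's inner count, rewritten as the same indicator sum over the accessed rows
theorem pvA_conteo_eq_sum (tablero : List (List (Option Int))) (n : Int) (j : Nat) :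
    pvA_conteo tablero n (j : Int) =
      (((PySem.List.pyRange 0 n 1).map (fun f => PySem.List.pyGetD tablero f [])).map (pvInd j)).sum := by
  unfold pvA_conteo
  rw [List.map_map]
  have hstep : (fun (cant : Int) (f : Int) =>
      if PySem.List.pyGetD (PySem.List.pyGetD tablero f []) ((j : Nat) : Int) none ≠ none then cant + 1 else cant)
      = fun cant f => cant + (pvInd j ∘ fun f => PySem.List.pyGetD tablero f []) f := by
    funext cant f
    simp only [pvInd, Function.comp, PySem.List.pyGetD_natCast]
    split <;> simp
  rw [hstep, PySem.List.foldl_add]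
  simp

-- A's early-exit comparison loop is List.all
theorem pvA_columnas_eq_all (tablero : List (List (Option Int))) (n : Int)
    (restricciones_columnas : List Int) (cs : List Int) :
    pvA_columnas tablero n restricciones_columnas cs =
      cs.all (fun c => pvA_conteo tablero n c == PySem.List.pyGetD restricciones_columnas c 0) := by
  induction cs with
  | nil => rfl
  | cons c cs ih =>
    unfold pvA_columnas
    rw [List.all_cons, ih]
    by_cases h : pvA_conteo tablero n c = PySem.List.pyGetD restricciones_columnas c 0
    · simp [h]
    · simp [h]

-- ===== VERDICT (by name: the statement is the Claim_ definition above) =====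
theorem se_cumplen_requisitos_consumos_columnas_spec : Claim_equal_se_cumplen_requisitos_consumos_columnas := by
  intro tablero n m restricciones_columnas _ _
  unfold Spec_se_cumplen_requisitos_consumos_columnas
  unfold se_cumplen_requisitos_consumos_columnas se_cumplen_requisitos_consumos_columnas_alt
  rw [pvA_columnas_eq_all]
  simp only [pvB_conteos_eq]
  rw [PySem.List.pyRange_one, List.all_map, List.map_map]
  simp only [Int.sub_zero]
  rw [Bool.eq_iff_iff, List.all_eq_true, beq_iff_eq, List.map_inj_left]
  constructor
  · intro h j hj
    have hh := h j hj
    simp only [Function.comp_apply, beq_iff_eq] at hh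
    have hz : ((0 : Int) + (j : Int)) = ((j : Nat) : Int) := by simp
    rw [hz, pvA_conteo_eq_sum, PySem.List.pyGetD_natCast] at hh
    simpa [Function.comp] using hh
  · intro h j hj
    have hh := h j hj
    simp only [Function.comp_apply, beq_iff_eq]
    have hz : ((0 : Int) + (j : Int)) = ((j : Nat) : Int) := by simp
    rw [hz, pvA_conteo_eq_sum, PySem.List.pyGetD_natCast]
    simpa [Function.comp] using hh
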